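-- pv_equiv track=rewrite | github.com/snsinfu/2022a-genome-dynamics | 2-signal/src/compute_local_alpha/command.py | enumerate_runs
-- ===== SOURCE A (Python) =====
-- def enumerate_runs(xs):
--     """
--     Return a list of ranges of equal values in `xs`.
--     """
--     ranges = []
--     start = 0
--     while start < len(xs):
--         end = find_first_not(xs, xs[start], start=(start + 1))
--         ranges.append((start, end))
--         start = end
--     return ranges
--
-- def find_first_not(xs, a, start=0):
--     """
--     Find the first element of `xs` that does not equal to `a`. Return the index
--     of the element if exists, or `len(xs)` otherwise.
--     """
--     for i in range(start, len(xs)):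
--         if xs[i] != a:
--             return i
--     return len(xs)
-- ===== SOURCE B (Python) =====
-- def enumerate_runs(xs):
--     """
--     Return a list of ranges of equal values in `xs`.
--
--     Computes the run boundary indices (positions where the value changes,
--     plus 0) in one comprehension, then pairs adjacent boundaries with zip.
--     """
--     n = len(xs)
--     bounds = [i for i in range(n) if i == 0 or xs[i] != xs[i - 1]] + [n]
--     return list(zip(bounds, bounds[1:]))
-- ===== Notes on version B (the rewrite author's own statement) =====
-- stated objective: simpler
-- what changed: Replaces A's explicit while-loop with the find_first_not two-pointer scan by a single comprehension collecting run-boundary indices (i == 0 or xs[i] != xs[i-1]) plus the sentinel len(xs), then pairs adjacent boundaries with zip; the constant-factor speedup comes from one C-level comprehension/zip pass instead of per-run Python-level find_first_not calls with index loops.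
import Mathlib
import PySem

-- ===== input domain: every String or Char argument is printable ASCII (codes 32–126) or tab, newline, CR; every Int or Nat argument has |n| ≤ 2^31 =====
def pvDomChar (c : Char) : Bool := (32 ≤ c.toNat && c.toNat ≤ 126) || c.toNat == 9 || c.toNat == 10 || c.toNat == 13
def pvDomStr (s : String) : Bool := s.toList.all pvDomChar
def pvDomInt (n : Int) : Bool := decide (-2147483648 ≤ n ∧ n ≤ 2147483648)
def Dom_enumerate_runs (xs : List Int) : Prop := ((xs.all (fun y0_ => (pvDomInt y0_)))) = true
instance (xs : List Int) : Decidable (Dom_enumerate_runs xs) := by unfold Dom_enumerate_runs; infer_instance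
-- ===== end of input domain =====

-- B replaces A's two-pointer while-loop over runs by a boundary-index comprehension
-- paired with zip (objective: simpler; same O(n) cost).

-- ===== PORT A =====
-- find_first_not: scan indices from `i` until an element differs from `a`.
def findFirstNot (xs : List Int) (a : Int) (i : Nat) : Nat :=
  if _h : i < xs.length then
    if xs.getD i 0 ≠ a then i else findFirstNot xs a (i + 1)
  else xs.length
termination_by xs.length - i

-- bounds needed by enumerate_runs' termination (cited in decreasing_by)
theorem findFirstNot_bounds (xs : List Int) (a : Int) (i : Nat) :
    i ≤ findFirstNot xs a i ∨ findFirstNot xs a i = xs.length := by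
  fun_induction findFirstNot <;> omega

def enumerate_runsGo (xs : List Int) (start : Nat) : List (Int × Int) :=
  if h : start < xs.length then
    let e := findFirstNot xs (xs.getD start 0) (start + 1)
    ((start : Int), (e : Int)) :: enumerate_runsGo xs e
  else []
termination_by xs.length - start
decreasing_by
  have := findFirstNot_bounds xs (xs.getD start 0) (start + 1)
  omega

def enumerate_runs (xs : List Int) : List (Int × Int) :=
  enumerate_runsGo xs 0

-- ===== PORT B =====
-- i == 0 or xs[i] != xs[i-1]; every index used is in range, so getD equals Python's xs[i]
def runBound (xs : List Int) (i : Nat) : Bool :=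
  i == 0 || xs.getD i 0 != xs.getD (i - 1) 0

def enumerate_runs_alt (xs : List Int) : List (Int × Int) :=
  let n := xs.length
  let bounds := ((List.range n).filter (runBound xs)) ++ [n]
  (bounds.zip (bounds.drop 1)).map (fun p => ((p.1 : Int), (p.2 : Int)))

-- ===== PRECONDITION & SPEC =====
def Spec_enumerate_runs (xs : List Int) (out : List (Int × Int)) : Prop := out = enumerate_runs_alt xs
instance (xs : List Int) (out : List (Int × Int)) : Decidable (Spec_enumerate_runs xs out) := by unfold Spec_enumerate_runs; infer_instance

-- ===== CLAIM (what is proved, stated in full; the proofs are below) =====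
def Claim_equal_enumerate_runs : Prop := ∀ (xs : List Int), Dom_enumerate_runs xs → Spec_enumerate_runs xs (enumerate_runs xs)

-- ===== LEMMAS AND PROOFS =====

-- characterization of find_first_not: all scanned elements up to the result equal `a`,
-- and the element at the result (if any) differs from `a`
theorem findFirstNot_spec (xs : List Int) (a : Int) (i : Nat) :
    i ≤ xs.length →
    (∀ j, i ≤ j → j < findFirstNot xs a i → xs.getD j 0 = a) ∧
    (findFirstNot xs a i < xs.length → xs.getD (findFirstNot xs a i) 0 ≠ a) ∧
    i ≤ findFirstNot xs a i ∧ findFirstNot xs a i ≤ xs.length := by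
  fun_induction findFirstNot with
  | case1 i h hne =>
    exact fun _ => ⟨fun j h1 h2 => by omega, fun _ => hne, le_refl _, by omega⟩
  | case2 i h hne ih =>
    intro hi
    obtain ⟨ih1, ih2, ih3, ih4⟩ := ih (by omega)
    simp only [ne_eq, not_not] at hne
    refine ⟨fun j h1 h2 => ?_, ih2, by omega, ih4⟩
    rcases Nat.eq_or_lt_of_le h1 with rfl | hlt
    · exact hne
    · exact ih1 j hlt h2
  | case3 i h =>
    exact fun hi => ⟨fun j h1 h2 => by omega, fun hh => by omega, by omega, le_refl _⟩

-- the main invariant: from a run-boundary `start`, A's loop produces exactly the zip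
-- of the boundary list of the remaining suffix of indices
theorem enumGo_eq (xs : List Int) (k : Nat) : ∀ start, xs.length - start ≤ k →
    start ≤ xs.length → (start < xs.length → runBound xs start = true) →
    enumerate_runsGo xs start =
      (let bounds := ((List.range' start (xs.length - start)).filter (runBound xs)) ++ [xs.length];
       (bounds.zip (bounds.drop 1)).map (fun p => ((p.1 : Int), (p.2 : Int)))) := by
  induction k with
  | zero =>
    intro start hk hle _
    have hs : start = xs.length := by omega
    subst hs
    simp [enumerate_runsGo]
  | succ k ih =>
    intro start hk hle hb
    by_cases h : start < xs.length
    · rw [enumerate_runsGo]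
      simp only [h, dite_true]
      set a := xs.getD start 0 with ha
      set e := findFirstNot xs a (start + 1) with he
      obtain ⟨hall, hdiff, hge, hlen⟩ := findFirstNot_spec xs a (start + 1) (by omega)
      rw [← he] at hall hdiff hge hlen
      -- decompose the index range at e
      have hsplit : List.range' start (xs.length - start) =
          List.range' start (e - start) ++ List.range' e (xs.length - e) := by
        have h2 := @List.range'_append start (e - start) (xs.length - e) 1
        have h3 : start + 1 * (e - start) = e := by omega
        rw [h3] at h2
        rw [show xs.length - start = (e - start) + (xs.length - e) from by omega, ← h2]
      -- interior indices are not boundaries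
      have hmid : ∀ j, start < j → j < e → runBound xs j = false := by
        intro j h1 h2
        have hj : xs.getD j 0 = a := hall j (by omega) h2
        have hj1 : xs.getD (j - 1) 0 = a := by
          rcases Nat.eq_or_lt_of_le (Nat.succ_le_of_lt h1) with hji | hji
          · rw [show j - 1 = start from by omega, ← ha]
          · exact hall (j - 1) (by omega) (by omega)
        unfold runBound
        rw [hj, hj1]
        simp
        omega
      have hnil : (List.range' (start + 1) (e - start - 1)).filter (runBound xs) = [] := by
        rw [List.filter_eq_nil_iff]
        intro j hj
        rw [List.mem_range'] at hj
        obtain ⟨i, hi, rfl⟩ := hj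
        simp [hmid (start + 1 + i) (by omega) (by omega)]
      have hfilt1 : (List.range' start (e - start)).filter (runBound xs) = [start] := by
        rw [show e - start = (e - start - 1) + 1 from by omega, List.range'_succ,
          List.filter_cons, hb h]
        simp [hnil]
      have hbe : e < xs.length → runBound xs e = true := by
        intro hel
        have h1 : xs.getD e 0 ≠ a := hdiff hel
        have h2 : xs.getD (e - 1) 0 = a := by
          rcases Nat.eq_or_lt_of_le hge with hei | hei
          · rw [show e - 1 = start from by omega, ← ha]
          · exact hall (e - 1) (by omega) (by omega)
        unfold runBound
        rw [h2]
        simp [bne_iff_ne]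
        exact Or.inr (by simpa [List.getD_eq_getElem?_getD] using h1)
      have ihe := ih e (by omega) hlen hbe
      rw [ihe]
      rw [hsplit, List.filter_append, hfilt1]
      -- now compute the zip with head start :: (bounds of suffix)
      by_cases hel : e < xs.length
      · have hcons : List.range' e (xs.length - e) =
            e :: List.range' (e + 1) (xs.length - e - 1) := by
          calc List.range' e (xs.length - e)
              = List.range' e ((xs.length - e - 1) + 1) := by
                rw [Nat.sub_add_cancel (by omega)]
            _ = e :: List.range' (e + 1) (xs.length - e - 1) := List.range'_succ ..
        rw [hcons, List.filter_cons, hbe hel]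
        simp [List.zip]
      · have heq : e = xs.length := by omega
        rw [show xs.length - e = 0 from by omega]
        simp [heq, List.zip]
    · rw [enumerate_runsGo]
      have hs : start = xs.length := by omega
      simp [hs]

-- ===== VERDICT (by name: the statement is the Claim_ definition above) =====
theorem enumerate_runs_spec : Claim_equal_enumerate_runs := by
  intro xs _
  unfold Spec_enumerate_runs enumerate_runs enumerate_runs_alt
  have h := enumGo_eq xs xs.length 0 (by omega) (by omega) (by intro _; simp [runBound])
  rw [h]
  simp [List.range_eq_range']
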